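-- pv_equiv track=rewrite | github.com/miliar/Code_Jam_Webscraper | solutions_python/solutions_year15_round0_nr1/1310.py | num_needed
-- ===== SOURCE A (Python) =====
-- import itertools
--
-- def num_needed(a):
--     r = range(1, len(a) + 1)
--     s = list(itertools.accumulate(a))
--     need = 0
--     i = 0
--     N = len(s)
--     while i < N:
--         if s[i] < r[i]:
--             d = r[i] - s[i]
--             need += d
--             j = i
--             while j < N:
--                 s[j] += d
--                 j += 1
--         i += 1
--
--     return need
-- ===== SOURCE B (Python) =====
-- def num_needed(a):
--     s = 0
--     need = 0
--     for i, x in enumerate(a, 1):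
--         s += x
--         if i - s > need:
--             need = i - s
--     return need
-- ===== Notes on version B (the rewrite author's own statement) =====
-- stated objective: faster
-- what changed: single O(n) pass tracking the running prefix sum and the maximum deficit, instead of A's O(n^2) rewrite of the whole prefix-sum suffix at each shortfall
import Mathlib
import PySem

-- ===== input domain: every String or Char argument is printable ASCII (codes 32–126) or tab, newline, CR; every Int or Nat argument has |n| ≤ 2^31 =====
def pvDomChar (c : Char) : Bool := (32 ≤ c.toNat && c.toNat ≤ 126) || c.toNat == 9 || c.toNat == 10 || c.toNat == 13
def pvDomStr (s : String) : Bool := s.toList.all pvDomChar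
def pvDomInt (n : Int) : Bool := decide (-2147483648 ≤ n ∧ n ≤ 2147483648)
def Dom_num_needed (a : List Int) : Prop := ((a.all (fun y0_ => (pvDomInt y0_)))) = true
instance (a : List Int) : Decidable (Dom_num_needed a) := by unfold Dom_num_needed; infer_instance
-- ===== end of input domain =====

-- B replaces A's quadratic suffix-rewriting scan with one linear pass over the list,
-- tracking the running prefix sum and the maximum deficit seen so far (objective: faster).

-- ===== PORT A =====
-- s = list(itertools.accumulate(a)), with running accumulator `acc`
def pvAccum (a : List Int) (acc : Int) : List Int :=
  match a with
  | [] => []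
  | x :: xs => (acc + x) :: pvAccum xs (acc + x)

-- inner while: `j = i; while j < N: s[j] += d; j += 1`  (adds d to every element from index i on)
def pvInner (s : List Int) (i : Nat) (d : Int) : List Int :=
  match s, i with
  | [], _ => []
  | x :: xs, 0 => (x + d) :: pvInner xs 0 d
  | x :: xs, Nat.succ j => x :: pvInner xs j d

theorem pvInner_length (s : List Int) (i : Nat) (d : Int) : (pvInner s i d).length = s.length := by
  induction s generalizing i with
  | nil => rfl
  | cons x xs ih => cases i <;> simp [pvInner, ih]

-- outer while: `while i < N: if s[i] < r[i]: …`  (r[i] = i + 1)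
def pvOuter (s : List Int) (i : Nat) (need : Int) : Int :=
  if h : i < s.length then
    let si := s.getD i 0
    if si < (i : Int) + 1 then
      let d := (i : Int) + 1 - si
      pvOuter (pvInner s i d) (i + 1) (need + d)
    else
      pvOuter s (i + 1) need
  else need
termination_by s.length - i
decreasing_by
  · rw [pvInner_length]; omega
  · omega

def num_needed (a : List Int) : Int :=
  pvOuter (pvAccum a 0) 0 0

-- ===== PORT B =====
-- for i, x in enumerate(a, 1): s += x; if i - s > need: need = i - s
def pvLoopB (a : List Int) (i : Int) (s : Int) (need : Int) : Int :=
  match a with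
  | [] => need
  | x :: xs =>
    let s' := s + x
    let need' := if i - s' > need then i - s' else need
    pvLoopB xs (i + 1) s' need'

def num_needed_alt (a : List Int) : Int :=
  pvLoopB a 1 0 0

-- ===== PRECONDITION & SPEC =====
def Spec_num_needed (a : List Int) (out : Int) : Prop := out = num_needed_alt a
instance (a : List Int) (out : Int) : Decidable (Spec_num_needed a out) := by unfold Spec_num_needed; infer_instance

-- ===== CLAIM (what is proved, stated in full; the proofs are below) =====
def Claim_equal_num_needed : Prop := ∀ (a : List Int), Dom_num_needed a → Spec_num_needed a (num_needed a)

-- ===== LEMMAS AND PROOFS =====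

-- pvInner is: keep the first i elements, add d to the rest
theorem pvInner_eq (s : List Int) (i : Nat) (d : Int) :
    pvInner s i d = s.take i ++ (s.drop i).map (· + d) := by
  induction s generalizing i with
  | nil => simp [pvInner]
  | cons x xs ih => cases i <;> simp [pvInner, ih]

-- suffix form of the outer loop: recursion on the not-yet-visited suffix of s
def pvOuter' (t : List Int) (i : Nat) (need : Int) : Int :=
  match t with
  | [] => need
  | x :: xs =>
    if x < (i : Int) + 1 then
      pvOuter' (xs.map (· + ((i : Int) + 1 - x))) (i + 1) (need + ((i : Int) + 1 - x))
    else
      pvOuter' xs (i + 1) need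
termination_by t.length
decreasing_by all_goals simp

theorem pvOuter_eq_suffix (n : Nat) :
    ∀ (s : List Int) (i : Nat) (need : Int), s.length ≤ i + n →
      pvOuter s i need = pvOuter' (s.drop i) i need := by
  induction n with
  | zero =>
    intro s i need hle
    rw [pvOuter]
    have h1 : ¬ i < s.length := by omega
    have h2 : s.drop i = [] := List.drop_eq_nil_of_le (by omega)
    simp [h1, h2, pvOuter']
  | succ n ih =>
    intro s i need hle
    rw [pvOuter]
    by_cases h : i < s.length
    · have hdrop : s.drop i = s[i] :: s.drop (i + 1) := List.drop_eq_getElem_cons h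
      have hgd : s.getD i 0 = s[i] := List.getD_eq_getElem s 0 h
      simp only [h, dif_pos, hgd]
      by_cases hc : s[i] < (i : Int) + 1
      · simp only [hc, if_pos]
        rw [ih _ _ _ (by rw [pvInner_length]; omega)]
        rw [hdrop, pvOuter']
        simp only [hc, if_pos]
        congr 1
        rw [pvInner_eq, List.drop_append]
        have htl : (s.take i).length = i := List.length_take_of_le (by omega)
        rw [htl, List.drop_eq_nil_of_le (by rw [htl]; omega)]
        rw [show i + 1 - i = 1 from by omega]
        rw [← List.map_drop, List.drop_drop]
        simp
      · simp only [hc, if_false]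
        rw [ih _ _ _ (by omega)]
        rw [hdrop, pvOuter']
        simp [hc]
    · have h2 : s.drop i = [] := List.drop_eq_nil_of_le (by omega)
      simp [h, h2, pvOuter']

-- the max-deficit loop over the (unshifted) accumulated list
def pvG (t : List Int) (i : Nat) (need : Int) : Int :=
  match t with
  | [] => need
  | x :: xs => pvG xs (i + 1) (if x + need < (i : Int) + 1 then (i : Int) + 1 - x else need)

-- a uniform shift of the suffix is the same as carrying the shift in `need`
theorem pvOuter'_shift (t : List Int) :
    ∀ (i : Nat) (need : Int), pvOuter' (t.map (· + need)) i need = pvG t i need := by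
  induction t with
  | nil => intro i need; simp [pvOuter', pvG]
  | cons x xs ih =>
    intro i need
    rw [List.map_cons, pvOuter', pvG]
    by_cases hc : x + need < (i : Int) + 1
    · simp only [hc, if_pos]
      have hmap : (xs.map (· + need)).map (· + ((i : Int) + 1 - (x + need)))
          = xs.map (· + ((i : Int) + 1 - x)) := by
        rw [List.map_map]; apply List.map_congr_left; intro y _; simp; ring
      have hneed : need + ((i : Int) + 1 - (x + need)) = (i : Int) + 1 - x := by ring
      rw [hmap, hneed, ih]
    · simp only [hc, if_false]
      rw [ih]

-- pvG over the accumulated list is exactly B's loop over the original list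
theorem pvG_accum (a : List Int) :
    ∀ (i : Nat) (s need : Int), pvG (pvAccum a s) i need = pvLoopB a ((i : Int) + 1) s need := by
  induction a with
  | nil => intro i s need; simp [pvAccum, pvG, pvLoopB]
  | cons x xs ih =>
    intro i s need
    simp only [pvAccum, pvG, pvLoopB]
    have e1 : (if s + x + need < (i : Int) + 1 then (i : Int) + 1 - (s + x) else need)
        = (if (i : Int) + 1 - (s + x) > need then (i : Int) + 1 - (s + x) else need) := by
      split_ifs <;> omega
    rw [e1, ih]
    norm_num

-- ===== VERDICT (by name: the statement is the Claim_ definition above) =====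
theorem num_needed_spec : Claim_equal_num_needed := by
  intro a _
  unfold Spec_num_needed num_needed num_needed_alt
  rw [pvOuter_eq_suffix (pvAccum a 0).length _ 0 0 (by omega)]
  have h0 : (pvAccum a 0).drop 0 = (pvAccum a 0).map (· + 0) := by simp
  rw [h0, pvOuter'_shift, pvG_accum]
  norm_num
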